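-- pv_equiv track=rewrite | github.com/ravitejalam/CodeSpace | base6.py | base6
-- ===== SOURCE A (Python) =====
-- def base6(decimal):
--     scale = 1
--     result = 0
--     decimal = abs(decimal)
--
--     while decimal > 0:
--         digit = decimal % 6
--         result += digit * scale
--         decimal //= 6
--         scale *= 10
--     return result
-- ===== SOURCE B (Python) =====
-- def base6(decimal):
--     def h(n):
--         if n == 0:
--             return 0
--         return h(n // 6) * 10 + n % 6
--     return h(abs(decimal))
-- ===== Notes on version B (the rewrite author's own statement) =====
-- stated objective: alternative
-- what changed: Replaces the while-loop with a scale accumulator by a recursive helper over the successive base-six quotients that assembles the decimal-encoded digits most-significant-first.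
import Mathlib
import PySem

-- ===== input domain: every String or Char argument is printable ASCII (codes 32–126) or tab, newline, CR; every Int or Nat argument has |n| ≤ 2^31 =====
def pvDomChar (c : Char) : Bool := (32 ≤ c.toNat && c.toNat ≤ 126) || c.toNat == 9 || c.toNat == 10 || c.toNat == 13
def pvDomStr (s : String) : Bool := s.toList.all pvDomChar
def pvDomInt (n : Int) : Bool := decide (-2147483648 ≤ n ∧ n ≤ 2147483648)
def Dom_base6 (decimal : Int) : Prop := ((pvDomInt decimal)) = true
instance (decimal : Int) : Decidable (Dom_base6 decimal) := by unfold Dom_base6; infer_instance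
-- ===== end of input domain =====

-- B rewrites A's while-loop with a scale accumulator as a recursive helper over the //6 quotients (alternative decomposition, same cost).

-- ===== PORT A =====
-- the while loop of A, on state (decimal, scale, result)
def base6Loop (d scale result : Int) : Int :=
  if _h : d > 0 then
    base6Loop (PySem.Int.floordiv d 6) (scale * 10) (result + PySem.Int.mod d 6 * scale)
  else result
termination_by d.toNat
decreasing_by
  have h6 : PySem.Int.floordiv d 6 = d / 6 := PySem.Int.floordiv_eq_ediv_of_pos (by omega)
  rw [h6]; omega

def base6 (decimal : Int) : Int := base6Loop |decimal| 1 0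

-- ===== PORT B =====
-- h receives only the nonnegative |decimal| and its //6 quotients, so it is ported over Nat;
-- Nat division/mod coincide with Python's // and % on nonnegative arguments (exact here).
def base6H (n : Nat) : Int :=
  if n = 0 then 0
  else base6H (n / 6) * 10 + (n % 6 : Nat)

def base6_alt (decimal : Int) : Int := base6H decimal.natAbs

-- ===== PRECONDITION & SPEC =====
def Spec_base6 (decimal : Int) (out : Int) : Prop := out = base6_alt decimal
instance (decimal : Int) (out : Int) : Decidable (Spec_base6 decimal out) := by unfold Spec_base6; infer_instance

-- ===== CLAIM (what is proved, stated in full; the proofs are below) =====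
def Claim_equal_base6 : Prop := ∀ (decimal : Int), Dom_base6 decimal → Spec_base6 decimal (base6 decimal)

-- ===== LEMMAS AND PROOFS =====
theorem base6Loop_eq (n : Nat) : ∀ scale result : Int,
    base6Loop (n : Int) scale result = result + scale * base6H n := by
  induction n using Nat.strong_induction_on with
  | _ n ih =>
    intro scale result
    rw [base6Loop, base6H]
    by_cases h0 : n = 0
    · simp [h0]
    · have hpos : (0:Int) < (n:Int) := by exact_mod_cast Nat.pos_of_ne_zero h0
      rw [dif_pos hpos, if_neg h0]
      rw [show PySem.Int.floordiv (n:Int) 6 = ((n / 6 : Nat) : Int) from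
            PySem.Int.floordiv_natCast n 6,
          show PySem.Int.mod (n:Int) 6 = ((n % 6 : Nat) : Int) from
            PySem.Int.mod_natCast n 6]
      rw [ih (n / 6) (Nat.div_lt_self (Nat.pos_of_ne_zero h0) (by norm_num))]
      ring

-- ===== VERDICT (by name: the statement is the Claim_ definition above) =====
theorem base6_spec : Claim_equal_base6 := by
  intro d _
  unfold Spec_base6 base6 base6_alt
  have : |d| = (d.natAbs : Int) := (Int.abs_eq_natAbs d)
  rw [this, base6Loop_eq d.natAbs]
  ring
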